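-- pv_equiv track=rewrite | github.com/wcznb/Computer-network-homework01 | Version 1.0/Decode.py | Locate_color
-- ===== SOURCE A (Python) =====
-- def Locate_color(masks):
--     steps = 30
--     r = list(masks[0])
--     y = list(masks[1])
--     b = list(masks[2])
--     g = list(masks[3])
--     colors=[]
--     color_temp = []
--     for i in range(26):
--         index = i*steps
--         r_count = sum(r[index:index + steps])
--         y_count = sum(y[index:index + steps])
--         b_count = sum(b[index:index + steps])
--         g_count = sum(g[index:index + steps])
--         switch = max(r_count, y_count, b_count, g_count)
--         # if (switch == 0): continue
--         if (i == 12): continue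
--         if (i == 13): continue
--         if (switch == r_count):
--             color_temp.append('red')
--         elif (switch == y_count):
--             color_temp.append('yellow')
--         elif (switch == b_count):
--             color_temp.append('blue')
--         else:
--             color_temp.append('green')
--         if(i%2==1):
--             z = (color_temp[0],color_temp[1])
--             colors.append(z)
--             color_temp=[]
--     return colors
-- ===== SOURCE B (Python) =====
-- def Locate_color(masks):
--     steps = 30
--     # prefix sums per channel: window sum = pref[hi] - pref[lo], no repeated slicing
--     pref = []
--     for k in range(4):
--         acc = [0]
--         for v in masks[k]:
--             acc.append(acc[-1] + v)
--         pref.append(acc)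
--     names = ('red', 'yellow', 'blue', 'green')
--
--     def wsum(p, index):
--         n = len(p) - 1
--         lo = min(index, n)
--         hi = min(index + steps, n)
--         return p[hi] - p[lo]
--
--     def color(i):
--         cs = [wsum(p, i * steps) for p in pref]
--         m = max(cs)
--         return next(name for name, c in zip(names, cs) if c == m)
--
--     # emit pairs directly: pair p covers blocks 2p and 2p+1; p == 6 is the skipped 12/13
--     return [(color(2 * p), color(2 * p + 1)) for p in range(13) if p != 6]
-- ===== Notes on version B (the rewrite author's own statement) =====
-- stated objective: alternative
-- what changed: B precomputes one prefix-sum table per channel so each window count is two table lookups instead of a slice-and-sum, and it emits one (color(2p), color(2p+1)) pair directly per p in range(13) skipping p==6, removing A's color_temp buffer and i%2 flush state; the arg-max label comes from next() over zip(names, counts).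
import Mathlib
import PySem

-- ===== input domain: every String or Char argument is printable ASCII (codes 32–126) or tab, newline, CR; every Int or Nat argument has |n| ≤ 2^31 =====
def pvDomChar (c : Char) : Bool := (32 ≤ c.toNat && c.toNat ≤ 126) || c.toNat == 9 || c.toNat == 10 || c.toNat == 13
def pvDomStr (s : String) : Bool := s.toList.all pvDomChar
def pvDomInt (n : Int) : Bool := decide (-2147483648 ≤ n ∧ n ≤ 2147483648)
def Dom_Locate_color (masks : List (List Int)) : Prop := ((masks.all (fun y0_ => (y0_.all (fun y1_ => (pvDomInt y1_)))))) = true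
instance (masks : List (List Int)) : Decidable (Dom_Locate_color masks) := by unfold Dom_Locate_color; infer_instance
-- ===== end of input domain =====

-- B replaces A's repeated slice-and-sum and interleaved color_temp/i%2 pairing state by per-channel
-- prefix-sum tables (window sum = two table lookups) and direct emission of one pair per p in range(13),
-- p != 6, covering blocks 2p and 2p+1 (objective: alternative).

-- ===== PORT A =====
-- A's single loop over range(26) with state (colors, color_temp); masks[k] via pyGet?
-- (Pre_ guarantees it is some; getD only discharges the Option).
-- Python's max(r,y,b,g) on ints equals the left-nested binary max written below.
def Locate_color (masks : List (List Int)) : List (String × String) :=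
  let steps : Int := 30
  let r := (PySem.List.pyGet? masks 0).getD []
  let y := (PySem.List.pyGet? masks 1).getD []
  let b := (PySem.List.pyGet? masks 2).getD []
  let g := (PySem.List.pyGet? masks 3).getD []
  let st := (PySem.List.pyRange 0 26 1).foldl (fun (acc : List (String × String) × List String) i =>
      let index := i * steps
      let r_count := (PySem.List.slice r (some index) (some (index + steps))).sum
      let y_count := (PySem.List.slice y (some index) (some (index + steps))).sum
      let b_count := (PySem.List.slice b (some index) (some (index + steps))).sum
      let g_count := (PySem.List.slice g (some index) (some (index + steps))).sum
      let switch := max (max (max r_count y_count) b_count) g_count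
      if i == 12 then acc
      else if i == 13 then acc
      else
        let color_temp :=
          if switch == r_count then acc.2 ++ ["red"]
          else if switch == y_count then acc.2 ++ ["yellow"]
          else if switch == b_count then acc.2 ++ ["blue"]
          else acc.2 ++ ["green"]
        if PySem.Int.mod i 2 == 1 then
          -- color_temp[0] / color_temp[1]; both are always present at this point
          (acc.1 ++ [((PySem.List.pyGet? color_temp 0).getD "", (PySem.List.pyGet? color_temp 1).getD "")], [])
        else (acc.1, color_temp))
    ([], [])
  st.1

-- ===== PORT B =====
-- prefix-sum table of a channel: acc = [0]; for v in masks[k]: acc.append(acc[-1] + v)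
def pvPrefix (ch : List Int) : List Int :=
  ch.foldl (fun acc v => acc ++ [(PySem.List.pyGet? acc (-1)).getD 0 + v]) [0]

-- window sum from the table: p[min(index+30, n)] - p[min(index, n)]  (indices are in range; getD peels Option)
def pvWsum (p : List Int) (index : Int) : Int :=
  let n : Int := (p.length : Int) - 1
  let lo := min index n
  let hi := min (index + 30) n
  (PySem.List.pyGet? p hi).getD 0 - (PySem.List.pyGet? p lo).getD 0

-- color(i): next(name for name, c in zip(names, cs) if c == max(cs))  (the generator always yields; getD peels Option)
def pvColor (pref : List (List Int)) (i : Int) : String :=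
  let cs := pref.map (fun p => pvWsum p (i * 30))
  let m := (PySem.List.max? cs (fun x => x)).getD 0
  (((["red", "yellow", "blue", "green"].zip cs).find? (fun nc => nc.2 == m)).map Prod.fst).getD ""

def Locate_color_alt (masks : List (List Int)) : List (String × String) :=
  let pref := (PySem.List.pyRange 0 4 1).map (fun k => pvPrefix ((PySem.List.pyGet? masks k).getD []))
  ((PySem.List.pyRange 0 13 1).filter (fun p => p != 6)).map
    (fun p => (pvColor pref (2 * p), pvColor pref (2 * p + 1)))

-- ===== PRECONDITION & SPEC =====
-- A raises IndexError on masks[k] (k ≤ 3) when masks has fewer than 4 rows; excluded.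
def Pre_Locate_color (masks : List (List Int)) : Prop := 4 ≤ masks.length
instance (masks : List (List Int)) : Decidable (Pre_Locate_color masks) := by unfold Pre_Locate_color; infer_instance
def pvWitness_Locate_color : List (List Int) := [[1, 0], [0, 1], [], []]

def Spec_Locate_color (masks : List (List Int)) (out : List (String × String)) : Prop := out = Locate_color_alt masks
instance (masks : List (List Int)) (out : List (String × String)) : Decidable (Spec_Locate_color masks out) := by unfold Spec_Locate_color; infer_instance

-- ===== CLAIM (what is proved, stated in full; the proofs are below) =====
def Claim_equal_Locate_color : Prop := ∀ (masks : List (List Int)), Dom_Locate_color masks → Pre_Locate_color masks → Spec_Locate_color masks (Locate_color masks)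

-- ===== LEMMAS AND PROOFS =====

-- closed form of the prefix-sum loop
def pvScan (t : Int) : List Int → List Int
  | [] => [t]
  | v :: vs => t :: pvScan (t + v) vs

theorem pvScan_foldl (c : List Int) : ∀ (acc : List Int) (t : Int),
    c.foldl (fun acc v => acc ++ [(PySem.List.pyGet? acc (-1)).getD 0 + v]) (acc ++ [t])
    = acc ++ pvScan t c := by
  induction c with
  | nil => intro acc t; simp [pvScan]
  | cons v vs ih =>
    intro acc t
    simp only [List.foldl_cons, PySem.List.pyGet?_neg_one_append_singleton, Option.getD_some, pvScan]
    have := ih (acc ++ [t]) (t + v)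
    simpa [List.append_assoc] using this

theorem pvPrefix_eq (c : List Int) : pvPrefix c = pvScan 0 c := by
  have := pvScan_foldl c [] 0
  simpa [pvPrefix] using this

theorem pvScan_length (c : List Int) : ∀ t, (pvScan t c).length = c.length + 1 := by
  induction c with
  | nil => intro t; simp [pvScan]
  | cons v vs ih => intro t; simp [pvScan, ih]

theorem pvScan_getElem? (c : List Int) : ∀ (t : Int) (k : Nat), k ≤ c.length →
    (pvScan t c)[k]? = some (t + (c.take k).sum) := by
  induction c with
  | nil =>
    intro t k hk
    simp only [List.length_nil, Nat.le_zero] at hk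
    subst hk; simp [pvScan]
  | cons v vs ih =>
    intro t k hk
    cases k with
    | zero => simp [pvScan]
    | succ k =>
      simp only [pvScan, List.getElem?_cons_succ, List.take_succ_cons, List.sum_cons]
      rw [ih (t + v) k (by simpa using hk)]
      ring_nf

theorem pvTake_min (c : List Int) (k : Nat) : c.take (min k c.length) = c.take k := by
  rcases le_total k c.length with h | h
  · rw [min_eq_left h]
  · rw [min_eq_right h, List.take_length, List.take_of_length_le h]

-- the prefix-sum window lookup equals A's slice-and-sum
theorem pvWsum_eq (c : List Int) (a : Int) (ha : 0 ≤ a) :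
    pvWsum (pvPrefix c) a = (PySem.List.slice c (some a) (some (a + 30))).sum := by
  rw [pvPrefix_eq]
  have hlen : ((pvScan 0 c).length : Int) = (c.length : Int) + 1 := by
    rw [pvScan_length]; push_cast; ring
  simp only [pvWsum]
  rw [PySem.List.slice_toNat c ha (by omega)]
  have hget : ∀ x : Int, 0 ≤ x →
      (PySem.List.pyGet? (pvScan 0 c) (min x ((pvScan 0 c).length - 1 : Int))).getD 0
      = (c.take (min x.toNat c.length)).sum := by
    intro x hx
    have h0 : (0:Int) ≤ min x (((pvScan 0 c).length : Int) - 1) := by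
      rw [hlen]; omega
    rw [PySem.List.pyGet?_of_nonneg _ h0]
    have ht : (min x (((pvScan 0 c).length : Int) - 1)).toNat = min x.toNat c.length := by
      rw [hlen]; omega
    rw [ht, pvScan_getElem? c 0 _ (by omega)]
    simp [pvTake_min]
  rw [hget a ha, hget (a + 30) (by omega)]
  have h30 : min (a + 30).toNat c.length = min (a.toNat + 30) c.length := by omega
  rw [h30, pvTake_min, pvTake_min]
  have : c.take (a.toNat + 30) = c.take a.toNat ++ (c.drop a.toNat).take 30 := by
    rw [← List.take_add]
  rw [this, List.sum_append]
  have harg : (a + 30).toNat - a.toNat = 30 := by omega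
  rw [harg]
  ring

-- A's if/elif arg-max chain, factored out
def pvChain (a b c d : Int) : String :=
  if max (max (max a b) c) d = a then "red"
  else if max (max (max a b) c) d = b then "yellow"
  else if max (max (max a b) c) d = c then "blue"
  else "green"

-- B's next-over-zip pick equals the chain, for any four sums
theorem pvPickB_eq (a b c d : Int) :
    (((["red", "yellow", "blue", "green"].zip [a, b, c, d]).find?
        (fun nc => nc.2 == ((PySem.List.max? [a, b, c, d] (fun x => x)).getD 0))).map Prod.fst).getD ""
    = pvChain a b c d := by
  simp only [PySem.List.max?_id_cons, List.foldl, Option.getD_some, List.zip, List.zipWith]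
  unfold pvChain
  simp only [max_assoc]
  by_cases h1 : a = max a (max b (max c d))
  · simp [← h1]
  · by_cases h2 : b = max a (max b (max c d))
    · have hab : ¬ a = b := fun h => h1 (h.trans h2)
      have hba : ¬ b = a := fun h => hab h.symm
      simp [← h2, hab, hba]
    · by_cases h3 : c = max a (max b (max c d))
      · have hac : ¬ a = c := fun h => h1 (h.trans h3)
        have hbc : ¬ b = c := fun h => h2 (h.trans h3)
        have hca : ¬ c = a := fun h => hac h.symm
        have hcb : ¬ c = b := fun h => hbc h.symm
        simp [← h3, hac, hbc, hca, hcb]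
      · have h4 : d = max a (max b (max c d)) := by
          rcases max_choice a (max b (max c d)) with h | h
          · exact absurd h.symm h1
          · rcases max_choice b (max c d) with h' | h'
            · exact absurd (h'.symm.trans h.symm) h2
            · rcases max_choice c d with h'' | h''
              · exact absurd ((h''.symm.trans h'.symm).trans h.symm) h3
              · exact (h''.symm.trans h'.symm).trans h.symm
        have had : ¬ a = d := fun h => h1 (h.trans h4)
        have hbd : ¬ b = d := fun h => h2 (h.trans h4)
        have hcd : ¬ c = d := fun h => h3 (h.trans h4)
        have hda : ¬ d = a := fun h => had h.symm
        have hdb : ¬ d = b := fun h => hbd h.symm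
        have hdc : ¬ d = c := fun h => hcd h.symm
        simp [← h4, had, hbd, hcd, hda, hdb, hdc]

-- pull the common 'ct ++' prefix out of A's append chain
theorem pvIf_push (p q s : Prop) [Decidable p] [Decidable q] [Decidable s] (ct : List String) :
    (if p then ct ++ ["red"] else if q then ct ++ ["yellow"] else if s then ct ++ ["blue"] else ct ++ ["green"])
    = ct ++ [if p then "red" else if q then "yellow" else if s then "blue" else "green"] := by
  split_ifs <;> rfl

-- B's per-block color in terms of A's four window sums
theorem pvColor_eq (r y b g : List Int) (i : Int) (hi : 0 ≤ i) :
    pvColor [pvPrefix r, pvPrefix y, pvPrefix b, pvPrefix g] i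
    = pvChain ((PySem.List.slice r (some (i * 30)) (some (i * 30 + 30))).sum)
        ((PySem.List.slice y (some (i * 30)) (some (i * 30 + 30))).sum)
        ((PySem.List.slice b (some (i * 30)) (some (i * 30 + 30))).sum)
        ((PySem.List.slice g (some (i * 30)) (some (i * 30 + 30))).sum) := by
  have h30 : (0:Int) ≤ i * 30 := by positivity
  unfold pvColor
  simp only [List.map, pvWsum_eq _ _ h30]
  exact pvPickB_eq _ _ _ _

-- the core equality, for arbitrary channel lists r y b g
set_option maxHeartbeats 2000000 in
theorem pvMain (r y b g : List Int) :
  ((PySem.List.pyRange 0 26 1).foldl (fun (acc : List (String × String) × List String) i =>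
      let index := i * 30
      let r_count := (PySem.List.slice r (some index) (some (index + 30))).sum
      let y_count := (PySem.List.slice y (some index) (some (index + 30))).sum
      let b_count := (PySem.List.slice b (some index) (some (index + 30))).sum
      let g_count := (PySem.List.slice g (some index) (some (index + 30))).sum
      let switch := max (max (max r_count y_count) b_count) g_count
      if i == 12 then acc
      else if i == 13 then acc
      else
        let color_temp :=
          if switch == r_count then acc.2 ++ ["red"]
          else if switch == y_count then acc.2 ++ ["yellow"]
          else if switch == b_count then acc.2 ++ ["blue"]
          else acc.2 ++ ["green"]
        if PySem.Int.mod i 2 == 1 then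
          (acc.1 ++ [((PySem.List.pyGet? color_temp 0).getD "", (PySem.List.pyGet? color_temp 1).getD "")], [])
        else (acc.1, color_temp))
    ([], [])).1
  = ((PySem.List.pyRange 0 13 1).filter (fun p => p != 6)).map
      (fun p => (pvColor [pvPrefix r, pvPrefix y, pvPrefix b, pvPrefix g] (2 * p),
                 pvColor [pvPrefix r, pvPrefix y, pvPrefix b, pvPrefix g] (2 * p + 1))) := by
  have h26 : PySem.List.pyRange 0 26 1 = [0,1,2,3,4,5,6,7,8,9,10,11,12,13,14,15,16,17,18,19,20,21,22,23,24,25] := by decide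
  have h13 : ((PySem.List.pyRange 0 13 1).filter (fun p => p != 6)) = [0,1,2,3,4,5,7,8,9,10,11,12] := by decide
  rw [h26, h13]
  obtain ⟨fr, hr⟩ : ∃ f : Int → Int, ∀ i : Int, (PySem.List.slice r (some (i*30)) (some (i*30+30))).sum = f i := ⟨_, fun _ => rfl⟩
  obtain ⟨fy, hy⟩ : ∃ f : Int → Int, ∀ i : Int, (PySem.List.slice y (some (i*30)) (some (i*30+30))).sum = f i := ⟨_, fun _ => rfl⟩
  obtain ⟨fb, hb⟩ : ∃ f : Int → Int, ∀ i : Int, (PySem.List.slice b (some (i*30)) (some (i*30+30))).sum = f i := ⟨_, fun _ => rfl⟩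
  obtain ⟨fg, hg⟩ : ∃ f : Int → Int, ∀ i : Int, (PySem.List.slice g (some (i*30)) (some (i*30+30))).sum = f i := ⟨_, fun _ => rfl⟩
  have hcol : ∀ i : Int, 0 ≤ i →
      pvColor [pvPrefix r, pvPrefix y, pvPrefix b, pvPrefix g] i = pvChain (fr i) (fy i) (fb i) (fg i) := by
    intro i hi
    rw [pvColor_eq r y b g i hi, hr, hy, hb, hg]
  simp only [List.map]
  simp only [hr, hy, hb, hg, pvIf_push]
  norm_num
  rw [hcol 0 (by norm_num), hcol 1 (by norm_num), hcol 2 (by norm_num), hcol 3 (by norm_num), hcol 4 (by norm_num), hcol 5 (by norm_num), hcol 6 (by norm_num), hcol 7 (by norm_num), hcol 8 (by norm_num), hcol 9 (by norm_num), hcol 10 (by norm_num), hcol 11 (by norm_num), hcol 14 (by norm_num), hcol 15 (by norm_num), hcol 16 (by norm_num), hcol 17 (by norm_num), hcol 18 (by norm_num), hcol 19 (by norm_num), hcol 20 (by norm_num), hcol 21 (by norm_num), hcol 22 (by norm_num), hcol 23 (by norm_num), hcol 24 (by norm_num), hcol 25 (by norm_num)]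
  simp only [pvChain]
  simp

-- ===== VERDICT (by name: the statement is the Claim_ definition above) =====
set_option maxHeartbeats 2000000 in
theorem Locate_color_spec : Claim_equal_Locate_color := by
  intro masks _ hpre
  unfold Pre_Locate_color at hpre
  obtain ⟨r, y, b, g, rest, rfl⟩ : ∃ r y b g rest, masks = r :: y :: b :: g :: rest := by
    match masks, hpre with
    | r :: y :: b :: g :: rest, _ => exact ⟨r, y, b, g, rest, rfl⟩
  unfold Spec_Locate_color Locate_color Locate_color_alt
  have hsl : PySem.List.pyRange 0 4 1 = [0, 1, 2, 3] := by decide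
  have hg0 : PySem.List.pyGet? (r :: y :: b :: g :: rest) 0 = some r :=
    PySem.List.pyGet?_zero_cons r _
  have hg1 : PySem.List.pyGet? (r :: y :: b :: g :: rest) 1 = some y := by
    rw [show (1:Int) = ((1:Nat):Int) by norm_num, PySem.List.pyGet?_natCast]; rfl
  have hg2 : PySem.List.pyGet? (r :: y :: b :: g :: rest) 2 = some b := by
    rw [show (2:Int) = ((2:Nat):Int) by norm_num, PySem.List.pyGet?_natCast]; rfl
  have hg3 : PySem.List.pyGet? (r :: y :: b :: g :: rest) 3 = some g := by
    rw [show (3:Int) = ((3:Nat):Int) by norm_num, PySem.List.pyGet?_natCast]; rfl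
  simp only [hsl, hg0, hg1, hg2, hg3, Option.getD_some, List.map]
  exact pvMain r y b g
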